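-- pv_equiv track=rewrite | github.com/lxs0940/python-study | hw2_2021320107.py | iSP_recursive
-- ===== SOURCE A (Python) =====
-- def iSP_recursive(n, k, p):
--     if n == k:
--         return True
--     if p == 0 and n != k:
--         return False
--     while p >= 1:
--         if n%p != 0:
--             p -= 1
--         else:
--             return iSP_recursive(n, k+p, p-1) or iSP_recursive(n, k, p-1)
-- ===== SOURCE B (Python) =====
-- def iSP_recursive(n, k, p):
--     # Bottom-up subset-sum DP over the divisors of n in [1..min(p, t)]:
--     # reach holds every subset sum <= t that is buildable so far.
--     t = n - k
--     if t <= 0: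
--         return t == 0
--     reach = {0}
--     for d in range(1, min(p, t) + 1):
--         if n % d == 0:
--             reach |= {s + d for s in reach if s + d <= t}
--     return t in reach
-- ===== Notes on version B (the rewrite author's own statement) =====
-- stated objective: faster
-- what changed: Replaces A's exponential two-way branching recursion over divisors by a bottom-up subset-sum DP that sweeps the divisors once, maintaining the set of reachable sums capped at the target.
-- outside the precondition, e.g. on iSP_recursive(5, 0, -1): A returns None, B returns False
import Mathlib
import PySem

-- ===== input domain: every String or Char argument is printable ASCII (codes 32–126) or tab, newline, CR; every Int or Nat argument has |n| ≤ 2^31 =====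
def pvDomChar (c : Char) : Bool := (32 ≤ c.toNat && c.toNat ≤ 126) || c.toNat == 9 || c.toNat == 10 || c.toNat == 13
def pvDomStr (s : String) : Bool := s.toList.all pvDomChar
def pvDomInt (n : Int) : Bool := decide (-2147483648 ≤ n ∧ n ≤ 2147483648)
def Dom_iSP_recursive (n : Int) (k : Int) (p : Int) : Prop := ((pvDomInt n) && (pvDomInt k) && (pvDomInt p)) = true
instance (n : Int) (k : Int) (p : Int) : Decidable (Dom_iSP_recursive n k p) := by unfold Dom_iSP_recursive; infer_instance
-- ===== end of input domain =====

-- B replaces A's exponential branching recursion with a bottom-up subset-sum DP over the divisors (objective: faster).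

-- ===== PORT A =====
-- A's while-loop is iSP_whileA; falling off the loop's end (only possible when p < 0,
-- outside Pre_) is Python's implicit 'return None', rendered as 'false' here.
mutual
def iSP_recursive (n : Int) (k : Int) (p : Int) : Bool :=
  if n = k then true
  else if p = 0 then false
  else iSP_whileA n k p
termination_by (p.toNat, 1)
decreasing_by exact Prod.Lex.right _ (by omega)

def iSP_whileA (n : Int) (k : Int) (p : Int) : Bool :=
  if h : 1 ≤ p then
    if PySem.Int.mod n p ≠ 0 then iSP_whileA n k (p - 1)
    else iSP_recursive n (k + p) (p - 1) || iSP_recursive n k (p - 1)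
  else false
termination_by (p.toNat, 0)
decreasing_by
  · exact Prod.Lex.left _ _ (by omega)
  · exact Prod.Lex.left _ _ (by omega)
  · exact Prod.Lex.left _ _ (by omega)
end

-- ===== PORT B =====
def iSP_recursive_alt (n : Int) (k : Int) (p : Int) : Bool :=
  let t := n - k
  if t ≤ 0 then t == 0
  else
  let reach : PySem.Set Int :=
    (PySem.List.pyRange 1 (min p t + 1) 1).foldl
      (fun reach d =>
        if PySem.Int.mod n d = 0 then
          PySem.Set.union reach
            (reach.foldl (fun acc s => if s + d ≤ t then PySem.Set.add acc (s + d) else acc)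
              PySem.Set.empty)
        else reach)
      (PySem.Set.add PySem.Set.empty 0)
  decide (t ∈ reach)

-- ===== PRECONDITION & SPEC =====
-- Pre_ excludes the inputs (p < 0 with n ≠ k) on which A's loop is never entered and the
-- function falls off the end, returning None instead of a bool.
def Pre_iSP_recursive (n : Int) (k : Int) (p : Int) : Prop := n = k ∨ 0 ≤ p
instance (n : Int) (k : Int) (p : Int) : Decidable (Pre_iSP_recursive n k p) := by unfold Pre_iSP_recursive; infer_instance
def pvWitness_iSP_recursive : Int × Int × Int := (12, 0, 12)

def Spec_iSP_recursive (n : Int) (k : Int) (p : Int) (out : Bool) : Prop := out = iSP_recursive_alt n k p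
instance (n : Int) (k : Int) (p : Int) (out : Bool) : Decidable (Spec_iSP_recursive n k p out) := by unfold Spec_iSP_recursive; infer_instance

-- ===== CLAIM (what is proved, stated in full; the proofs are below) =====
def Claim_equal_iSP_recursive : Prop := ∀ (n : Int) (k : Int) (p : Int), Dom_iSP_recursive n k p → Pre_iSP_recursive n k p → Spec_iSP_recursive n k p (iSP_recursive n k p)

-- ===== LEMMAS AND PROOFS =====

-- Reference function: canR n t m = "some subset of the divisors of n in [1..m] sums to t".
def canR (n : Int) (t : Int) : Nat → Bool
  | 0 => t == 0
  | (m+1) =>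
      if PySem.Int.mod n ((m : Int) + 1) = 0 then
        canR n (t - ((m : Int) + 1)) m || canR n t m
      else canR n t m

lemma canR_zero (n : Int) (m : Nat) : canR n 0 m = true := by
  induction m with
  | zero => rfl
  | succ m ih =>
      simp only [canR]
      split <;> simp [ih]

lemma canR_neg (n t : Int) (m : Nat) (ht : t < 0) : canR n t m = false := by
  induction m generalizing t with
  | zero => simp [canR]; omega
  | succ m ih =>
      simp only [canR]
      split <;> simp [ih _ ht, ih (t - ((m : Int) + 1)) (by omega)]

-- divisors larger than the (positive) target never contribute
lemma canR_min (n t : Int) (m₀ : Nat) (hm₀ : t ≤ (m₀ : Int)) :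
    ∀ m : Nat, m₀ ≤ m → canR n t m = canR n t m₀ := by
  intro m
  induction m with
  | zero => intro h; have h0 : m₀ = 0 := by omega
            rw [h0]
  | succ m ih =>
      intro h
      rcases Nat.eq_or_lt_of_le h with heq | hlt
      · rw [heq]
      · have hm : m₀ ≤ m := by omega
        have hneg : t - ((m : Int) + 1) < 0 := by
          have : (m₀ : Int) ≤ (m : Int) := by exact_mod_cast hm
          omega
        simp only [canR, canR_neg n _ m hneg]
        rw [ih hm]
        split <;> simp

-- A-side characterisation, proved by strong induction on p.toNat.
lemma A_eq_canR : ∀ (m : Nat) (n k p : Int), p.toNat = m →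
    ((n ≠ k → iSP_whileA n k p = canR n (n - k) m) ∧
     (0 ≤ p → iSP_recursive n k p = canR n (n - k) m)) := by
  intro m
  induction m using Nat.strong_induction_on with
  | _ m ih =>
    intro n k p hm
    have hwhile : n ≠ k → iSP_whileA n k p = canR n (n - k) m := by
      intro hnk
      rw [iSP_whileA]
      by_cases hp : 1 ≤ p
      · have hm' : (p - 1).toNat = m - 1 := by omega
        have hmpos : 1 ≤ m := by omega
        have hcast : ((m - 1 : Nat) : Int) + 1 = p := by omega
        obtain ⟨m', hm'eq⟩ : ∃ m', m = m' + 1 := ⟨m - 1, by omega⟩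
        subst hm'eq
        simp only [Nat.add_sub_cancel] at hm' hcast
        simp only [hp, dif_pos]
        by_cases hdvd : PySem.Int.mod n p = 0
        · have h1 := (ih m' (by omega) n (k + p) (p - 1) hm').2 (by omega)
          have h2 := (ih m' (by omega) n k (p - 1) hm').2 (by omega)
          simp only [hdvd, ne_eq, not_true_eq_false, if_false]
          rw [h1, h2]
          simp only [canR, hcast, hdvd, if_pos]
          have : n - (k + p) = n - k - p := by ring
          rw [this]
        · have h1 := (ih m' (by omega) n k (p - 1) hm').1 hnk
          simp only [hdvd, ne_eq, not_false_eq_true, if_true]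
          rw [h1]
          simp only [canR]
          rw [hcast]
          simp [hdvd]
      · have hm0 : m = 0 := by omega
        subst hm0
        simp only [hp, dif_neg, not_false_eq_true]
        simp [canR]
        omega
    refine ⟨hwhile, ?_⟩
    intro hp0
    rw [iSP_recursive]
    by_cases hnk : n = k
    · simp [hnk, canR_zero]
    · simp only [hnk, if_false]
      by_cases hpz : p = 0
      · have : m = 0 := by omega
        subst this
        simp [hpz, canR]
        omega
      · simp only [hpz, if_false]
        exact hwhile hnk

-- B-side: reachability predicate for the DP set.
def reachB (n t y : Int) : Nat → Bool
  | 0 => y == 0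
  | (m+1) =>
      if PySem.Int.mod n ((m : Int) + 1) = 0 then
        reachB n t y m || (decide (y ≤ t) && reachB n t (y - ((m : Int) + 1)) m)
      else reachB n t y m

-- membership in the filtered-comprehension fold
lemma mem_foldl_add_if {t d : Int} (l : List Int) (acc : PySem.Set Int) (y : Int) :
    y ∈ l.foldl (fun acc s => if s + d ≤ t then PySem.Set.add acc (s + d) else acc) acc ↔
    y ∈ acc ∨ ∃ s ∈ l, s + d ≤ t ∧ y = s + d := by
  induction l generalizing acc with
  | nil => simp
  | cons x xs ih =>
      simp only [List.foldl_cons, ih, List.mem_cons]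
      by_cases hx : x + d ≤ t
      · simp only [hx, if_true, PySem.Set.mem_add]
        constructor
        · rintro (⟨h | h⟩ | ⟨s, hs1, hs2, hs3⟩)
          · exact Or.inl h
          · exact Or.inr ⟨x, Or.inl rfl, hx, h⟩
          · exact Or.inr ⟨s, Or.inr hs1, hs2, hs3⟩
        · rintro (h | ⟨s, (rfl | hs1), hs2, hs3⟩)
          · exact Or.inl (Or.inl h)
          · exact Or.inl (Or.inr hs3)
          · exact Or.inr ⟨s, hs1, hs2, hs3⟩
      · simp only [hx, if_false]
        constructor
        · rintro (h | ⟨s, hs1, hs2, hs3⟩)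
          · exact Or.inl h
          · exact Or.inr ⟨s, Or.inr hs1, hs2, hs3⟩
        · rintro (h | ⟨s, (rfl | hs1), hs2, hs3⟩)
          · exact Or.inl h
          · exact absurd hs2 hx
          · exact Or.inr ⟨s, hs1, hs2, hs3⟩

def foldRange (n t : Int) (m : Nat) : PySem.Set Int :=
  (PySem.List.pyRange 1 ((m : Int) + 1) 1).foldl
    (fun reach d =>
      if PySem.Int.mod n d = 0 then
        PySem.Set.union reach
          (reach.foldl (fun acc s => if s + d ≤ t then PySem.Set.add acc (s + d) else acc)
            PySem.Set.empty)
      else reach)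
    (PySem.Set.add PySem.Set.empty 0)

lemma mem_foldRange (n t : Int) : ∀ (m : Nat) (y : Int),
    y ∈ foldRange n t m ↔ reachB n t y m = true := by
  intro m
  induction m with
  | zero =>
      intro y
      have h1 : ((0 : Nat) : Int) + 1 = 1 := by norm_num
      rw [foldRange, h1, PySem.List.pyRange_one_eq_nil le_rfl]
      simp [reachB, PySem.Set.add, PySem.Set.empty, PySem.Set.contains]
  | succ m ih =>
      intro y
      have hsplit : PySem.List.pyRange 1 (((m + 1 : Nat) : Int) + 1) 1
          = PySem.List.pyRange 1 ((m : Int) + 1) 1 ++ [(m : Int) + 1] := by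
        have h2 : (((m + 1 : Nat) : Int) + 1) = ((m : Int) + 1) + 1 := by push_cast; ring
        rw [h2, PySem.List.pyRange_one_succ_right (by omega)]
      have hstep : foldRange n t (m + 1)
          = (if PySem.Int.mod n ((m : Int) + 1) = 0 then
              PySem.Set.union (foldRange n t m)
                ((foldRange n t m).foldl
                  (fun acc s => if s + ((m : Int) + 1) ≤ t then PySem.Set.add acc (s + ((m : Int) + 1)) else acc)
                  PySem.Set.empty)
            else foldRange n t m) := by
        simp only [foldRange, hsplit, List.foldl_append, List.foldl_cons, List.foldl_nil]
      rw [hstep]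
      by_cases hdvd : PySem.Int.mod n ((m : Int) + 1) = 0
      · simp only [hdvd, if_true]
        rw [PySem.Set.mem_union, mem_foldl_add_if]
        simp only [reachB, hdvd, if_true]
        constructor
        · rintro (h | hemp | ⟨s, hs1, hs2, hs3⟩)
          · simp [(ih y).mp h]
          · exact absurd hemp (by simp [PySem.Set.empty])
          · subst hs3
            have hs := (ih s).mp hs1
            simp [hs, hs2, show s + ((m : Int) + 1) - ((m : Int) + 1) = s by ring]
        · intro h
          simp only [Bool.or_eq_true, Bool.and_eq_true, decide_eq_true_eq] at h
          rcases h with h | ⟨hyt, h⟩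
          · exact Or.inl ((ih y).mpr h)
          · exact Or.inr (Or.inr ⟨y - ((m : Int) + 1), (ih _).mpr h, by omega, by ring⟩)
      · simp only [hdvd, if_false]
        rw [ih y]
        simp only [reachB, hdvd, if_false]

lemma reachB_eq_canR (n t : Int) : ∀ (m : Nat) (y : Int), y ≤ t →
    reachB n t y m = canR n y m := by
  intro m
  induction m with
  | zero => intro y _; rfl
  | succ m ih =>
      intro y hy
      simp only [reachB, canR]
      by_cases hdvd : PySem.Int.mod n ((m : Int) + 1) = 0
      · simp only [hdvd, if_pos]
        rw [ih y hy, ih (y - ((m : Int) + 1)) (by omega)]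
        simp [hy, Bool.or_comm]
      · simp only [hdvd, if_neg, not_false_eq_true]
        exact ih y hy

lemma B_eq_canR (n k p : Int) (hp : 0 ≤ p) :
    iSP_recursive_alt n k p = canR n (n - k) p.toNat := by
  unfold iSP_recursive_alt
  by_cases ht : n - k ≤ 0
  · simp only [ht, if_true]
    rcases eq_or_lt_of_le ht with heq | hlt
    · rw [heq]; simp [canR_zero]
    · rw [canR_neg n (n - k) p.toNat hlt]
      simp only [beq_eq_false_iff_ne, ne_eq]
      omega
  · simp only [ht, if_false]
    push Not at ht
    have hq : 0 ≤ min p (n - k) := le_min hp (by omega)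
    have hrange : min p (n - k) + 1 = (((min p (n - k)).toNat : Int)) + 1 := by omega
    rw [hrange]
    have hmem := mem_foldRange n (n - k) (min p (n - k)).toNat (n - k)
    rw [reachB_eq_canR n (n - k) (min p (n - k)).toNat (n - k) le_rfl] at hmem
    unfold foldRange at hmem
    have hlift : canR n (n - k) p.toNat = canR n (n - k) (min p (n - k)).toNat := by
      rcases le_total p (n - k) with hple | htle
      · rw [min_eq_left hple]
      · rw [min_eq_right htle]
        exact canR_min n (n - k) (n - k).toNat (by omega) p.toNat (by omega)
    rw [hlift]
    cases hc : canR n (n - k) (min p (n - k)).toNat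
    · rw [hc] at hmem
      simp only [Bool.false_eq_true, iff_false] at hmem
      exact decide_eq_false hmem
    · rw [hc] at hmem
      simp only [iff_true] at hmem
      exact decide_eq_true hmem

-- ===== VERDICT (by name: the statement is the Claim_ definition above) =====
theorem iSP_recursive_spec : Claim_equal_iSP_recursive := by
  intro n k p _ hpre
  unfold Spec_iSP_recursive
  by_cases hp : 0 ≤ p
  · rw [(A_eq_canR p.toNat n k p rfl).2 hp, B_eq_canR n k p hp]
  · rcases hpre with hnk | hpge
    · subst hnk
      rw [iSP_recursive]
      unfold iSP_recursive_alt
      simp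
    · omega
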